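-- pv_equiv track=rewrite | github.com/ghkdqhrbals/algorithm | (HASH)위장.py | solution
-- ===== SOURCE A (Python) =====
-- from collections import defaultdict
--
-- def solution(clothes):
--     d = defaultdict(list)
--     for i in clothes:
--         d[i[1]] = d[i[1]] + [i[0]]
--
--     answer = 1
--     for key in d:
--         answer *= len(d[key]) + 1
--
--     return answer - 1
-- ===== SOURCE B (Python) =====
-- def solution(clothes):
--     cats = sorted(item[1] for item in clothes)
--     answer = 1
--     i = 0
--     n = len(cats)
--     while i < n:
--         j = i
--         while j < n and cats[j] == cats[i]:
--             j += 1
--         answer *= (j - i) + 1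
--         i = j
--     return answer - 1
-- ===== Notes on version B (the rewrite author's own statement) =====
-- stated objective: alternative
-- what changed: B sorts the categories and multiplies (run length + 1) over the maximal runs of equal categories in one scan, instead of A's dict that groups item names per category by list concatenation and then multiplies (group length + 1).
import Mathlib
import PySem

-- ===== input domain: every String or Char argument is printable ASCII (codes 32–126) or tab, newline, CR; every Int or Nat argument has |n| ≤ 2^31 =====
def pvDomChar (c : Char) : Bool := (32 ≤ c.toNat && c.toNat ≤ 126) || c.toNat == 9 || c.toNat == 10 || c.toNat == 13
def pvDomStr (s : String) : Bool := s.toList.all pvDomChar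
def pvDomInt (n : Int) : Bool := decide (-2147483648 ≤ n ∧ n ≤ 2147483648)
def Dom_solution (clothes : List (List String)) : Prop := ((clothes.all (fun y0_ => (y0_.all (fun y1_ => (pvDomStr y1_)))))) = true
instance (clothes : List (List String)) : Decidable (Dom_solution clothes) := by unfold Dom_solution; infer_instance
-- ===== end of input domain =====

-- B sorts the category list and multiplies (run length + 1) over the maximal runs of
-- equal categories in one scan; A groups item names per category in a dict by list
-- concatenation and multiplies (group length + 1) (objective: alternative).

-- ===== PORT A =====
def solution (clothes : List (List String)) : Int :=
  let d : PySem.Dict String (List String) :=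
    clothes.foldl
      (fun d i =>
        d.insert (PySem.List.pyGetD i 1 "")
          (d.getD (PySem.List.pyGetD i 1 "") [] ++ [PySem.List.pyGetD i 0 ""]))
      PySem.Dict.empty
  let answer : Int :=
    d.keys.foldl (fun a key => a * (((d.getD key []).length : Int) + 1)) 1
  answer - 1

-- ===== PORT B =====
-- the outer while loop of Source B: at index i it multiplies by (j - i) + 1 where j - i is
-- the length of the maximal run of elements equal to cats[i], then jumps to j; here the
-- suffix cats[i:] is the argument, and j - i = 1 + length of the equal prefix of the tail
def runScan : List String → Int
  | [] => 1
  | a :: rest =>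
      (((rest.takeWhile (fun x => x == a)).length + 1 : Int) + 1) *
        runScan (rest.dropWhile (fun x => x == a))
termination_by l => l.length
decreasing_by
  simpa using Nat.lt_succ_of_le (List.length_dropWhile_le _ _)

def solution_alt (clothes : List (List String)) : Int :=
  let cats := PySem.List.sorted (clothes.map (fun item => PySem.List.pyGetD item 1 "")) (fun x => x) false
  runScan cats - 1

-- ===== PRECONDITION & SPEC =====
-- Pre_ excludes inputs with an inner list of length < 2, on which A raises IndexError at i[1].
def Pre_solution (clothes : List (List String)) : Prop :=
  ∀ i ∈ clothes, 2 ≤ i.length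
instance (clothes : List (List String)) : Decidable (Pre_solution clothes) := by
  unfold Pre_solution; infer_instance
def pvWitness_solution : List (List String) :=
  [["yellow_hat", "headgear"], ["blue_sunglasses", "eyewear"], ["green_turban", "headgear"]]
def Spec_solution (clothes : List (List String)) (out : Int) : Prop := out = solution_alt clothes
instance (clothes : List (List String)) (out : Int) : Decidable (Spec_solution clothes out) := by unfold Spec_solution; infer_instance

-- ===== CLAIM (what is proved, stated in full; the proofs are below) =====
def Claim_equal_solution : Prop := ∀ (clothes : List (List String)), Dom_solution clothes → Pre_solution clothes → Spec_solution clothes (solution clothes)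

-- ===== LEMMAS AND PROOFS =====

-- length of A's per-key grouped list = number of items with that key
lemma lenA_getD (l : List (List String)) (d : PySem.Dict String (List String)) (c : String) :
    ((l.foldl
      (fun d i =>
        d.insert (PySem.List.pyGetD i 1 "")
          (d.getD (PySem.List.pyGetD i 1 "") [] ++ [PySem.List.pyGetD i 0 ""]))
      d).getD c []).length
    = (d.getD c []).length + (l.map (fun i => PySem.List.pyGetD i 1 "")).count c := by
  induction l generalizing d with
  | nil => simp
  | cons x xs ih =>
    simp only [List.foldl_cons, List.map_cons, ih, PySem.Dict.getD_insert, List.count_cons]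
    by_cases h : c = PySem.List.pyGetD x 1 ""
    · simp [h]; omega
    · simp [h, Ne.symm h]

-- on a nondecreasing list, the run scan computes the product of (count + 1) over distinct elements
lemma runScan_sorted (l : List String) (hs : l.Pairwise (· ≤ ·)) :
    runScan l = ∏ k ∈ l.toFinset, ((l.count k : Int) + 1) := by
  induction l using runScan.induct with
  | case1 => simp [runScan]
  | case2 a rest ih =>
    set p : String → Bool := fun x => x == a with hp
    set t := rest.takeWhile p with ht
    set d := rest.dropWhile p with hd
    have hsplit : t ++ d = rest := List.takeWhile_append_dropWhile
    have hta : ∀ x ∈ t, x = a := fun x hx => by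
      have := List.mem_takeWhile_imp hx; simpa [hp] using this
    have hle : ∀ x ∈ rest, a ≤ x := fun x hx => (List.pairwise_cons.mp hs).1 x hx
    have hrest : rest.Pairwise (· ≤ ·) := (List.pairwise_cons.mp hs).2
    have hdpw : d.Pairwise (· ≤ ·) := hrest.sublist (List.dropWhile_sublist _)
    have hand : a ∉ d := by
      intro hmem
      cases hdd : d with
      | nil => simp [hdd] at hmem
      | cons h d' =>
        have hh : p h = false := by
          have := List.head?_dropWhile_not p rest
          rw [← hd, hdd] at this; simpa using this
        have hha : h ≠ a := by simpa [hp] using hh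
        have hah : a ≤ h := hle h (by rw [← hsplit, hdd]; simp)
        have hlt : a < h := lt_of_le_of_ne hah (Ne.symm hha)
        rw [hdd] at hmem
        rcases List.mem_cons.mp hmem with h1 | h2
        · exact hha h1.symm
        · have : h ≤ a := (List.pairwise_cons.mp (hdd ▸ hdpw)).1 a h2
          exact absurd (lt_of_lt_of_le hlt this) (lt_irrefl a)
    have hcnt_a : (a :: rest).count a = t.length + 1 := by
      rw [← hsplit]
      simp [List.count_append, List.count_eq_zero_of_not_mem hand,
        List.count_eq_length.mpr (fun x hx => (hta x hx).symm)]
    have hcnt_ne : ∀ k, k ≠ a → (a :: rest).count k = d.count k := by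
      intro k hk
      rw [← hsplit]
      have : t.count k = 0 := List.count_eq_zero_of_not_mem (fun hx => hk (hta k hx))
      simp [List.count_append, this, Ne.symm hk]
    have hfin : (a :: rest).toFinset = insert a d.toFinset := by
      ext x
      simp [← hsplit, List.mem_toFinset, or_comm]
      constructor
      · rintro (h1 | h2 | h3)
        · exact Or.inl h1
        · exact Or.inr h2
        · exact Or.inl (hta x h3)
      · rintro (h1 | h2)
        · exact Or.inl h1
        · exact Or.inr (Or.inl h2)
    rw [runScan, hfin, Finset.prod_insert (by simpa using hand)]
    rw [ih hdpw]
    congr 1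
    · rw [hcnt_a]; push_cast; ring
    · exact Finset.prod_congr rfl fun k hk => by
        rw [hcnt_ne k (fun h => hand (h ▸ List.mem_toFinset.mp hk))]

-- a left fold multiplying by f over a list is the product of the mapped list
lemma foldl_mul_eq_prod (f : String → Int) (l : List String) (init : Int) :
    l.foldl (fun a k => a * f k) init = init * (l.map f).prod := by
  induction l generalizing init with
  | nil => simp
  | cons x xs ih => simp [ih, mul_assoc]

theorem solution_spec : Claim_equal_solution := by
  intro clothes _ _
  unfold Spec_solution solution solution_alt
  dsimp only
  set key : List String → String := fun i => PySem.List.pyGetD i 1 "" with hkey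
  set ks : List String := clothes.map key with hks
  -- A side: keys are the distinct categories, group lengths are counts
  have hkeysA :
      (clothes.foldl
        (fun d i => d.insert (key i) (d.getD (key i) [] ++ [PySem.List.pyGetD i 0 ""]))
        (PySem.Dict.empty : PySem.Dict String (List String))).keys
      = PySem.Set.ofList ks := by
    rw [PySem.Dict.keys_foldl_insert_key clothes key _ _]
    simp [PySem.Set.ofList, PySem.Set.update, PySem.Dict.keys_empty, hks]
  rw [hkeysA]
  have hA : (PySem.Set.ofList ks).foldl
      (fun a k => a * ((((clothes.foldl
        (fun d i => d.insert (key i) (d.getD (key i) [] ++ [PySem.List.pyGetD i 0 ""]))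
        (PySem.Dict.empty : PySem.Dict String (List String))).getD k []).length : Int) + 1)) 1
      = ((PySem.Set.ofList ks).map (fun k => ((ks.count k : Int) + 1))).prod := by
    have h1 : (PySem.Set.ofList ks).foldl
        (fun a k => a * ((((clothes.foldl
          (fun d i => d.insert (key i) (d.getD (key i) [] ++ [PySem.List.pyGetD i 0 ""]))
          (PySem.Dict.empty : PySem.Dict String (List String))).getD k []).length : Int) + 1)) 1
        = (PySem.Set.ofList ks).foldl (fun a k => a * ((ks.count k : Int) + 1)) 1 := by
      apply PySem.List.foldl_congr_mem
      intro a k _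
      rw [lenA_getD]
      simp only [PySem.Dict.getD_empty, List.length_nil, Nat.zero_add]
      rfl
    rw [h1, foldl_mul_eq_prod, one_mul]
  rw [hA, ← List.prod_toFinset _ (PySem.Set.nodup_ofList ks)]
  -- B side: the run scan of the sorted categories computes the same product
  have hperm : (PySem.List.sorted ks (fun x => x) false).Perm ks := PySem.List.sorted_perm ks _ _
  have hpw : (PySem.List.sorted ks (fun x => x) false).Pairwise (· ≤ ·) := by
    simpa using PySem.List.sorted_pairwise ks (fun x => x)
  rw [runScan_sorted _ hpw]
  have hfin : (PySem.List.sorted ks (fun x => x)).toFinset = (PySem.Set.ofList ks).toFinset := by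
    ext x; simp [List.mem_toFinset, PySem.Set.mem_ofList, hperm.mem_iff]
  rw [hfin]
  congr 1
  apply Finset.prod_congr rfl
  intro k hk
  rw [hperm.count_eq]
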